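-- pv_equiv track=rewrite | github.com/filliptm/ComfyUI_Fill-Nodes | nodes/FL_ModelInspector.py | analyze_architecture
-- ===== SOURCE A (Python) =====
-- def analyze_architecture(model_keys):
--     """Analyze model architecture based on key patterns"""
--     architecture_info = []
--
--     # Check for common model architectures
--     if any("unet" in key.lower() for key in model_keys):
--         architecture_info.append("U-Net architecture detected")
--
--     if any("transformer" in key.lower() for key in model_keys):
--         architecture_info.append("Transformer components detected")
--
--     if any("attention" in key.lower() for key in model_keys):
--         architecture_info.append("Attention mechanisms detected")
--
--     if any("resnet" in key.lower() or "residual" in key.lower() for key in model_keys):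
--         architecture_info.append("ResNet/Residual connections detected")
--
--     if any("encoder" in key.lower() and "decoder" in key.lower() for key in model_keys):
--         architecture_info.append("Encoder-Decoder architecture detected")
--
--     if any("embedding" in key.lower() for key in model_keys):
--         architecture_info.append("Embedding layers detected")
--
--     if any("norm" in key.lower() for key in model_keys):
--         architecture_info.append("Normalization layers detected")
--
--     # Count layer types
--     conv_count = sum(1 for key in model_keys if "conv" in key.lower())
--     linear_count = sum(1 for key in model_keys if "linear" in key.lower() or "fc" in key.lower())
--
--     if conv_count > 0:
--         architecture_info.append(f"Contains {conv_count} convolutional layers/components")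
--     if linear_count > 0:
--         architecture_info.append(f"Contains {linear_count} linear/fully-connected layers")
--
--     return architecture_info
-- ===== SOURCE B (Python) =====
-- def analyze_architecture(model_keys):
--     """Analyze model architecture based on key patterns (single pass)"""
--     has_unet = has_transformer = has_attention = has_resnet = False
--     has_encdec = has_embedding = has_norm = False
--     conv_count = linear_count = 0
--
--     for key in model_keys:
--         kl = key.lower()
--         if "unet" in kl:
--             has_unet = True
--         if "transformer" in kl:
--             has_transformer = True
--         if "attention" in kl:
--             has_attention = True
--         if "resnet" in kl or "residual" in kl:
--             has_resnet = True
--         if "encoder" in kl and "decoder" in kl: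
--             has_encdec = True
--         if "embedding" in kl:
--             has_embedding = True
--         if "norm" in kl:
--             has_norm = True
--         if "conv" in kl:
--             conv_count += 1
--         if "linear" in kl or "fc" in kl:
--             linear_count += 1
--
--     architecture_info = []
--     if has_unet:
--         architecture_info.append("U-Net architecture detected")
--     if has_transformer:
--         architecture_info.append("Transformer components detected")
--     if has_attention:
--         architecture_info.append("Attention mechanisms detected")
--     if has_resnet:
--         architecture_info.append("ResNet/Residual connections detected")
--     if has_encdec:
--         architecture_info.append("Encoder-Decoder architecture detected")
--     if has_embedding:
--         architecture_info.append("Embedding layers detected")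
--     if has_norm:
--         architecture_info.append("Normalization layers detected")
--     if conv_count > 0:
--         architecture_info.append(f"Contains {conv_count} convolutional layers/components")
--     if linear_count > 0:
--         architecture_info.append(f"Contains {linear_count} linear/fully-connected layers")
--     return architecture_info
-- ===== Notes on version B (the rewrite author's own statement) =====
-- stated objective: faster
-- what changed: Replaces nine separate any/sum scans (each lowering every key again) with one accumulating pass that lowers each key once and maintains seven flags and two counters.
import Mathlib
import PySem

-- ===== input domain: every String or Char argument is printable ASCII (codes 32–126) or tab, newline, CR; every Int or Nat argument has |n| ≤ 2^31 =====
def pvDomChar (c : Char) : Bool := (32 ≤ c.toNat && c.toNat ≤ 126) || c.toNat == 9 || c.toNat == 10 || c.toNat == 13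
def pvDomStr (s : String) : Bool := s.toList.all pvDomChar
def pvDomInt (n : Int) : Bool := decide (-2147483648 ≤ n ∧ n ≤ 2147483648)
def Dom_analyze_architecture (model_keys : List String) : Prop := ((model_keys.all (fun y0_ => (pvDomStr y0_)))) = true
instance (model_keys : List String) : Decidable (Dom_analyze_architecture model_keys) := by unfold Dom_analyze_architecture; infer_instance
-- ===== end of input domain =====

-- B replaces A's nine separate scans over model_keys by one accumulating pass that lowers
-- each key once and maintains seven flags and two counters; same messages, same order.

-- ===== PORT A =====
-- literal transliteration: each `any(...)` is a separate List.any scan, each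
-- `sum(1 for key in model_keys if p)` is a filter-then-sum over ones
def analyze_architecture (model_keys : List String) : List String :=
  let architecture_info : List String := []
  let architecture_info :=
    if model_keys.any (fun key => PySem.Str.isIn "unet" (PySem.Str.lower key)) then
      architecture_info ++ ["U-Net architecture detected"] else architecture_info
  let architecture_info :=
    if model_keys.any (fun key => PySem.Str.isIn "transformer" (PySem.Str.lower key)) then
      architecture_info ++ ["Transformer components detected"] else architecture_info
  let architecture_info :=
    if model_keys.any (fun key => PySem.Str.isIn "attention" (PySem.Str.lower key)) then
      architecture_info ++ ["Attention mechanisms detected"] else architecture_info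
  let architecture_info :=
    if model_keys.any (fun key => PySem.Str.isIn "resnet" (PySem.Str.lower key) ||
        PySem.Str.isIn "residual" (PySem.Str.lower key)) then
      architecture_info ++ ["ResNet/Residual connections detected"] else architecture_info
  let architecture_info :=
    if model_keys.any (fun key => PySem.Str.isIn "encoder" (PySem.Str.lower key) &&
        PySem.Str.isIn "decoder" (PySem.Str.lower key)) then
      architecture_info ++ ["Encoder-Decoder architecture detected"] else architecture_info
  let architecture_info :=
    if model_keys.any (fun key => PySem.Str.isIn "embedding" (PySem.Str.lower key)) then
      architecture_info ++ ["Embedding layers detected"] else architecture_info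
  let architecture_info :=
    if model_keys.any (fun key => PySem.Str.isIn "norm" (PySem.Str.lower key)) then
      architecture_info ++ ["Normalization layers detected"] else architecture_info
  let conv_count : Int :=
    ((model_keys.filter (fun key => PySem.Str.isIn "conv" (PySem.Str.lower key))).map
      (fun _ => (1 : Int))).sum
  let linear_count : Int :=
    ((model_keys.filter (fun key => PySem.Str.isIn "linear" (PySem.Str.lower key) ||
        PySem.Str.isIn "fc" (PySem.Str.lower key))).map (fun _ => (1 : Int))).sum
  let architecture_info :=
    if conv_count > 0 then
      architecture_info ++
        ["Contains " ++ PySem.Int.toStr conv_count ++ " convolutional layers/components"]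
    else architecture_info
  let architecture_info :=
    if linear_count > 0 then
      architecture_info ++
        ["Contains " ++ PySem.Int.toStr linear_count ++ " linear/fully-connected layers"]
    else architecture_info
  architecture_info

-- ===== PORT B =====
structure ArchSt where
  unet : Bool
  transformer : Bool
  attention : Bool
  resnet : Bool
  encdec : Bool
  embedding : Bool
  norm : Bool
  conv : Int
  linear : Int
deriving Repr, DecidableEq

def archStep (s : ArchSt) (key : String) : ArchSt :=
  let kl := PySem.Str.lower key
  { unet := s.unet || PySem.Str.isIn "unet" kl
    transformer := s.transformer || PySem.Str.isIn "transformer" kl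
    attention := s.attention || PySem.Str.isIn "attention" kl
    resnet := s.resnet || (PySem.Str.isIn "resnet" kl || PySem.Str.isIn "residual" kl)
    encdec := s.encdec || (PySem.Str.isIn "encoder" kl && PySem.Str.isIn "decoder" kl)
    embedding := s.embedding || PySem.Str.isIn "embedding" kl
    norm := s.norm || PySem.Str.isIn "norm" kl
    conv := if PySem.Str.isIn "conv" kl then s.conv + 1 else s.conv
    linear := if PySem.Str.isIn "linear" kl || PySem.Str.isIn "fc" kl then s.linear + 1
              else s.linear }

def analyze_architecture_alt (model_keys : List String) : List String :=
  let s := model_keys.foldl archStep ⟨false, false, false, false, false, false, false, 0, 0⟩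
  let info : List String := []
  let info := if s.unet then info ++ ["U-Net architecture detected"] else info
  let info := if s.transformer then info ++ ["Transformer components detected"] else info
  let info := if s.attention then info ++ ["Attention mechanisms detected"] else info
  let info := if s.resnet then info ++ ["ResNet/Residual connections detected"] else info
  let info := if s.encdec then info ++ ["Encoder-Decoder architecture detected"] else info
  let info := if s.embedding then info ++ ["Embedding layers detected"] else info
  let info := if s.norm then info ++ ["Normalization layers detected"] else info
  let info := if s.conv > 0 then
      info ++ ["Contains " ++ PySem.Int.toStr s.conv ++ " convolutional layers/components"]
    else info
  let info := if s.linear > 0 then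
      info ++ ["Contains " ++ PySem.Int.toStr s.linear ++ " linear/fully-connected layers"]
    else info
  info

-- ===== PRECONDITION & SPEC =====
def Spec_analyze_architecture (model_keys : List String) (out : List String) : Prop := out = analyze_architecture_alt model_keys
instance (model_keys : List String) (out : List String) : Decidable (Spec_analyze_architecture model_keys out) := by unfold Spec_analyze_architecture; infer_instance

-- ===== CLAIM (what is proved, stated in full; the proofs are below) =====
def Claim_equal_analyze_architecture : Prop := ∀ (model_keys : List String), Dom_analyze_architecture model_keys → Spec_analyze_architecture model_keys (analyze_architecture model_keys)

-- ===== LEMMAS AND PROOFS =====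

-- the single fold computes exactly A's nine independent scans
theorem fold_spec (l : List String) : ∀ (s : ArchSt),
    l.foldl archStep s =
      { unet := s.unet || l.any (fun k => PySem.Str.isIn "unet" (PySem.Str.lower k))
        transformer := s.transformer || l.any (fun k => PySem.Str.isIn "transformer" (PySem.Str.lower k))
        attention := s.attention || l.any (fun k => PySem.Str.isIn "attention" (PySem.Str.lower k))
        resnet := s.resnet || l.any (fun k => PySem.Str.isIn "resnet" (PySem.Str.lower k) ||
                    PySem.Str.isIn "residual" (PySem.Str.lower k))
        encdec := s.encdec || l.any (fun k => PySem.Str.isIn "encoder" (PySem.Str.lower k) &&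
                    PySem.Str.isIn "decoder" (PySem.Str.lower k))
        embedding := s.embedding || l.any (fun k => PySem.Str.isIn "embedding" (PySem.Str.lower k))
        norm := s.norm || l.any (fun k => PySem.Str.isIn "norm" (PySem.Str.lower k))
        conv := s.conv + ((l.filter (fun k => PySem.Str.isIn "conv" (PySem.Str.lower k))).map
                  (fun _ => (1 : Int))).sum
        linear := s.linear + ((l.filter (fun k => PySem.Str.isIn "linear" (PySem.Str.lower k) ||
                  PySem.Str.isIn "fc" (PySem.Str.lower k))).map (fun _ => (1 : Int))).sum } := by
  induction l with
  | nil => intro s; simp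
  | cons h t ih =>
    intro s
    simp only [List.foldl_cons, ih, archStep, List.any_cons, List.filter_cons]
    apply ArchSt.mk.injEq .. |>.mpr
    refine ⟨?_, ?_, ?_, ?_, ?_, ?_, ?_, ?_, ?_⟩ <;>
      first
        | (simp [Bool.or_assoc]; done)
        | (split <;> rename_i hc <;> simp [hc] <;> omega)

-- ===== VERDICT (by name: the statement is the Claim_ definition above) =====
theorem analyze_architecture_spec : Claim_equal_analyze_architecture := by
  intro model_keys _
  unfold Spec_analyze_architecture analyze_architecture analyze_architecture_alt
  rw [fold_spec]
  simp
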